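-- pv_equiv track=rewrite | github.com/RomanRidium/PL_Rogov | 10/10.1/10.1.py | find_max_ordered
-- ===== SOURCE A (Python) =====
-- def find_max_ordered(matrix):
--     max_element = 0
--     for row in matrix:
--         if sorted(row) == row or sorted(row, reverse=True) == row:
--             current_max = max(row)
--             if current_max > max_element:
--                 max_element = current_max
--
--     return max_element
-- ===== SOURCE B (Python) =====
-- def find_max_ordered(matrix):
--     best = 0
--     for row in matrix:
--         nondec = all(a <= b for a, b in zip(row, row[1:]))
--         noninc = all(a >= b for a, b in zip(row, row[1:]))
--         if nondec or noninc:
--             best = max(best, row[0], row[-1])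
--     return best
-- ===== Notes on version B (the rewrite author's own statement) =====
-- stated objective: alternative
-- what changed: replaces the two sorted() calls per row by a single-pass adjacent-pair monotonicity test and takes the row maximum as max(first,last) of a monotone row, never sorting; the pure-Python scan is not measurably faster than CPython's C sorted
import Mathlib
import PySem

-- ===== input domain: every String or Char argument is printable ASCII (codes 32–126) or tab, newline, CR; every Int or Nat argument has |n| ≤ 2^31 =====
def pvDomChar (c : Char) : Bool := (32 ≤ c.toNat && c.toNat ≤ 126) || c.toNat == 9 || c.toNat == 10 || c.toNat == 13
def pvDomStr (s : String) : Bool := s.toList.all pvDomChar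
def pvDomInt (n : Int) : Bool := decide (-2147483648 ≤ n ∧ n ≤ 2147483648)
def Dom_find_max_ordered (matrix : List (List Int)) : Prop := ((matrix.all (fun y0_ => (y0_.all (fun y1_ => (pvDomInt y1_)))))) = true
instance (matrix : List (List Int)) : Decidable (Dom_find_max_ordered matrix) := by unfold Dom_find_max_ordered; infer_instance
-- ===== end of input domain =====

-- B replaces the two sorted() calls per row by one adjacent-pair monotonicity scan and
-- reads the row maximum off the endpoints (objective: alternative, no sorting).

-- ===== PORT A =====
def find_max_ordered (matrix : List (List Int)) : Int :=
  matrix.foldl (fun max_element row =>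
    if PySem.List.sorted row (fun x => x) false = row ∨ PySem.List.sorted row (fun x => x) true = row then
      match PySem.List.max? row (fun x => x) with
      | some current_max => if current_max > max_element then current_max else max_element
      | none => max_element   -- Python: max([]) raises ValueError; excluded by Pre_
    else max_element) 0

-- ===== PORT B =====
def find_max_ordered_alt (matrix : List (List Int)) : Int :=
  matrix.foldl (fun best row =>
    let pairs := row.zip (row.drop 1)
    let nondec := pairs.all (fun p => decide (p.1 ≤ p.2))
    let noninc := pairs.all (fun p => decide (p.2 ≤ p.1))
    if nondec || noninc then
      match row with
      | [] => best   -- Python: row[0] raises IndexError; excluded by Pre_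
      | h :: t => max (max best h) ((h :: t).getLast (List.cons_ne_nil h t))
    else best) 0

-- ===== PRECONDITION & SPEC =====
-- Pre_ excludes matrices containing an empty row: there A raises ValueError (max of
-- an empty, trivially "sorted" row) and B raises IndexError (row[0]).
def Pre_find_max_ordered (matrix : List (List Int)) : Prop := ∀ row ∈ matrix, row ≠ []
instance (matrix : List (List Int)) : Decidable (Pre_find_max_ordered matrix) := by unfold Pre_find_max_ordered; infer_instance
def pvWitness_find_max_ordered : List (List Int) := [[1, 2, 2], [5, 3, 1], [2, 9, 1]]
def Spec_find_max_ordered (matrix : List (List Int)) (out : Int) : Prop := out = find_max_ordered_alt matrix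
instance (matrix : List (List Int)) (out : Int) : Decidable (Spec_find_max_ordered matrix out) := by unfold Spec_find_max_ordered; infer_instance

-- ===== CLAIM (what is proved, stated in full; the proofs are below) =====
def Claim_equal_find_max_ordered : Prop := ∀ (matrix : List (List Int)), Dom_find_max_ordered matrix → Pre_find_max_ordered matrix → Spec_find_max_ordered matrix (find_max_ordered matrix)

-- ===== LEMMAS AND PROOFS =====

-- sorted(row) == row  ↔  row is nondecreasing
theorem pv_sorted_eq_iff (row : List Int) :
    PySem.List.sorted row (fun x => x) false = row ↔ row.Pairwise (· ≤ ·) := by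
  constructor
  · intro h
    have := PySem.List.sorted_pairwise (xs := row) (key := fun x => x)
    rwa [h] at this
  · intro h
    exact PySem.List.sorted_eq_self_of_pairwise row (fun x => x) h

-- sorted(row, reverse=True) == row  ↔  row is nonincreasing
theorem pv_sorted_rev_eq_iff (row : List Int) :
    PySem.List.sorted row (fun x => x) true = row ↔ row.Pairwise (fun a b => b ≤ a) := by
  constructor
  · intro h
    have := PySem.List.sorted_pairwise_rev (xs := row) (key := fun x => x)
    rwa [h] at this
  · intro h
    exact PySem.List.sorted_rev_eq_self_of_pairwise row (fun x => x) h

-- the adjacent-pair scan tests IsChain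
theorem pv_zipall_iff_isChain (r : Int → Int → Bool) :
    ∀ row : List Int,
      ((row.zip (row.drop 1)).all (fun p => r p.1 p.2) = true ↔ List.IsChain (fun a b => r a b = true) row)
  | [] => by simp
  | [h] => by simp
  | h :: b :: t => by
    have ih := pv_zipall_iff_isChain r (b :: t)
    simp only [List.drop_one, List.tail_cons, List.zip_cons_cons, List.all_cons, Bool.and_eq_true,
      List.isChain_cons_cons] at *
    tauto

theorem pv_zipall_le_iff (row : List Int) :
    ((row.zip (row.drop 1)).all (fun p => decide (p.1 ≤ p.2)) = true ↔ row.Pairwise (· ≤ ·)) := by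
  refine (pv_zipall_iff_isChain (fun a b => decide (a ≤ b)) row).trans ?_
  simp only [decide_eq_true_eq]
  exact List.isChain_iff_pairwise

theorem pv_zipall_ge_iff (row : List Int) :
    ((row.zip (row.drop 1)).all (fun p => decide (p.2 ≤ p.1)) = true ↔ row.Pairwise (fun a b => b ≤ a)) := by
  refine (pv_zipall_iff_isChain (fun a b => decide (b ≤ a)) row).trans ?_
  simp only [decide_eq_true_eq]
  exact @List.isChain_iff_pairwise _ _ _ ⟨fun hab hbc => le_trans hbc hab⟩

-- in a nondecreasing list every element is ≤ the last one
theorem pv_le_getLast : ∀ (h : Int) (t : List Int), (h :: t).Pairwise (· ≤ ·) →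
    ∀ y ∈ h :: t, y ≤ (h :: t).getLast (List.cons_ne_nil h t)
  | h, [], _, y, hy => by simp at hy; simp [hy]
  | h, b :: t, hp, y, hy => by
    rw [List.pairwise_cons] at hp
    have ih := pv_le_getLast b t hp.2
    rw [List.getLast_cons (List.cons_ne_nil b t)]
    rcases List.mem_cons.mp hy with rfl | hy'
    · exact le_trans (hp.1 b (List.mem_cons_self)) (ih b (List.mem_cons_self))
    · exact ih y hy'

-- per-row step equality on nonempty rows
theorem pv_step_eq (best h : Int) (t : List Int) :
    (if PySem.List.sorted (h :: t) (fun x => x) false = h :: t ∨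
        PySem.List.sorted (h :: t) (fun x => x) true = h :: t then
      match PySem.List.max? (h :: t) (fun x => x) with
      | some current_max => if current_max > best then current_max else best
      | none => best
    else best)
    =
    (let pairs := (h :: t).zip ((h :: t).drop 1)
     let nondec := pairs.all (fun p => decide (p.1 ≤ p.2))
     let noninc := pairs.all (fun p => decide (p.2 ≤ p.1))
     if nondec || noninc then
       max (max best h) ((h :: t).getLast (List.cons_ne_nil h t))
     else best) := by
  simp only [Bool.or_eq_true, pv_zipall_le_iff, pv_zipall_ge_iff, pv_sorted_eq_iff,
    pv_sorted_rev_eq_iff]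
  split_ifs with hc
  · -- monotone row
    have hmax := PySem.List.max?_id_cons h t
    rw [hmax]
    show (if t.foldl max h > best then t.foldl max h else best) = _
    have hmem : t.foldl max h ∈ h :: t := PySem.List.max?_mem hmax
    have hub : ∀ y ∈ h :: t, y ≤ t.foldl max h := by
      intro y hy
      simpa using PySem.List.max?_isMax hmax y hy
    have hLmem : (h :: t).getLast (List.cons_ne_nil h t) ∈ h :: t := List.getLast_mem _
    have hML : max h ((h :: t).getLast (List.cons_ne_nil h t)) = t.foldl max h := by
      rcases hc with hnd | hni
      · -- nondecreasing: last is the max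
        have h1 := pv_le_getLast h t hnd _ hmem
        have h2 := hub _ hLmem
        have h3 := pv_le_getLast h t hnd h List.mem_cons_self
        omega
      · -- nonincreasing: head is the max
        rw [List.pairwise_cons] at hni
        have h1 : t.foldl max h ≤ h := by
          rcases List.mem_cons.mp hmem with he | hm
          · omega
          · exact hni.1 _ hm
        have h2 := hub h List.mem_cons_self
        have h3 : (h :: t).getLast (List.cons_ne_nil h t) ≤ h := by
          rcases List.mem_cons.mp hLmem with he | hm
          · omega
          · exact hni.1 _ hm
        omega
    rw [max_assoc, hML]
    split_ifs <;> omega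
  · rfl

-- ===== VERDICT (by name: the statement is the Claim_ definition above) =====
theorem find_max_ordered_spec : Claim_equal_find_max_ordered := by
  intro matrix _ hpre
  unfold Spec_find_max_ordered find_max_ordered find_max_ordered_alt
  apply PySem.List.foldl_congr_mem
  intro acc row hrow
  rcases row with _ | ⟨h, t⟩
  · exact absurd rfl (hpre [] hrow)
  · exact pv_step_eq acc h t
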